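-- pv_equiv track=rewrite | github.com/crwilcox/advent-of-code | 2023/day11/day11.py | part2
-- ===== SOURCE A (Python) =====
-- def find_galaxies(space: list[str]) -> list[tuple]:
--     ret = []
--     for row, r in enumerate(space):
--         for col, square in enumerate(r):
--             if square == "#":
--                 ret.append((row, col))
--
--     return ret
--
-- def adjust_coordinate_for_expanded_space(space, row, col, multiplier=1_000_000):
--     # Expand Rows
--     row_adjust = 0
--     for r in space[:row]:
--         if r.count(".") == len(r):
--             row_adjust += 1
--     row_adjust = (row_adjust * multiplier) - row_adjust
--
--     # Expand Columns
--     idx = 0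
--     col_adjust = 0
--     while idx < col:
--         all_dots = True
--         for r in space:
--             if r[idx] != ".":
--                 all_dots = False
--                 break
--         if all_dots:
--             col_adjust += 1
--         idx += 1
--     col_adjust = (col_adjust * multiplier) - col_adjust
--
--     return row + row_adjust, col + col_adjust
--
-- def calculate_distance_between_galaxies(galaxy_1, galaxy_2):
--     g1r, g1c = galaxy_1
--     g2r, g2c = galaxy_2
--     d = abs(g1r - g2r) + abs(g1c - g2c)
--     return d
--
-- def get_distance_between_all_galaxies(galaxies):
--     distances_between_galaxies = []
--     for idx, g1 in enumerate(galaxies[:-1]):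
--         for _, g2 in enumerate(galaxies[idx + 1 :]):
--             distances_between_galaxies.append(
--                 calculate_distance_between_galaxies(g1, g2)
--             )
--     return distances_between_galaxies
--
-- def part2(input, multiplier=1_000_000):
--     galaxies = find_galaxies(input)
--     galaxies = [
--         adjust_coordinate_for_expanded_space(input, row, col, multiplier)
--         for row, col in galaxies
--     ]
--     distances_between_galaxies = get_distance_between_all_galaxies(galaxies)
--
--     return sum(distances_between_galaxies)
-- ===== SOURCE B (Python) =====
-- def _axis_sum(xs):
--     # xs nondecreasing: sum over all pairs i<j of xs[j]-xs[i], via a running prefix sum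
--     total = 0
--     prefix = 0
--     for i, x in enumerate(xs):
--         total += i * x - prefix
--         prefix += x
--     return total
--
--
-- def part2(input, multiplier=1_000_000):
--     width = max((len(line) for line in input), default=0)
--     # col_shift[c] = (multiplier-1) * number of all-dot columns strictly left of c
--     col_shift = []
--     e = 0
--     for c in range(width):
--         col_shift.append((multiplier - 1) * e)
--         if all(c < len(line) and line[c] == '.' for line in input):
--             e += 1
--     rows = []
--     cols = []
--     e = 0
--     for r, line in enumerate(input):
--         shift = (multiplier - 1) * e
--         for c, ch in enumerate(line):
--             if ch == '#':
--                 rows.append(r + shift)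
--                 cols.append(c + col_shift[c])
--         if all(ch == '.' for ch in line):
--             e += 1
--     return _axis_sum(sorted(rows)) + _axis_sum(sorted(cols))
-- ===== Notes on version B (the rewrite author's own statement) =====
-- stated objective: alternative
-- what changed: Instead of rescanning the whole grid per galaxy and summing distances over all galaxy pairs, B counts empty rows/columns once with running prefix counts and computes each axis's pairwise-distance sum by a sorted-coordinates prefix-sum formula.
-- crash fix: On grids where some galaxy's column scan walks past the end of a shorter line whose predecessors are all '.' in that column, A raises IndexError while B's length-guarded column test returns the distance sum (e.g. (["..#", "."], 2) -> 0). — e.g. on part2(["..#", "."], 2): A raises IndexError, B returns 0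
import Mathlib
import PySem

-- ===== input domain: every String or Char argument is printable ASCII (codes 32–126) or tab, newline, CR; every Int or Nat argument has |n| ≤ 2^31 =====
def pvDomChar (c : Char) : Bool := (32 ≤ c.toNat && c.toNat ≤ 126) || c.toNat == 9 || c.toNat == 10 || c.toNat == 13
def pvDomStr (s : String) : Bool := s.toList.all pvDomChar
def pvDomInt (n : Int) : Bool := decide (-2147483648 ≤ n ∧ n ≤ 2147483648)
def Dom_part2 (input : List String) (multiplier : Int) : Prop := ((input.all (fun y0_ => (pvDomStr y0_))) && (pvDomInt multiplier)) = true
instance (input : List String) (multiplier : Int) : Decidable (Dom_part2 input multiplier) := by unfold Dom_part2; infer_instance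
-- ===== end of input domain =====

-- B replaces A's per-galaxy rescans of the grid and its quadratic pairwise-distance loop by
-- one-pass prefix counts of empty rows/columns plus a per-axis sorted-coordinate prefix-sum formula
-- (alternative algorithm; measured cost on the generated benchmark inputs is comparable).

-- ===== PORT A =====
def findGalaxies (space : List String) : List (Int × Int) :=
  (PySem.List.enumerate space).foldl (fun ret rp =>
    (PySem.List.enumerate rp.2.toList).foldl (fun ret cp =>
      if cp.2 == '#' then ret ++ [(rp.1, cp.1)] else ret) ret) []

-- the inner 'for r in space: if r[idx] != ".": all_dots = False; break' loop;
-- r[idx] is PySem.Str.pyGet? (none = IndexError, excluded by Pre_; '!' an arbitrary total default)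
def allDotsLoop (space : List String) (idx : Int) : Bool :=
  match space with
  | [] => true
  | r :: rest =>
      if ((PySem.Str.pyGet? r idx).getD '!') != '.' then false else allDotsLoop rest idx

-- 'while idx < col: … idx += 1' scans idx = 0,1,…,col-1, i.e. range(0, col)
def adjustCoordinateForExpandedSpace (space : List String) (row col multiplier : Int) : Int × Int :=
  let rowAdjust : Int := (PySem.List.slice space none (some row)).foldl
      (fun acc r => if ((PySem.Str.count r "." : Int) == PySem.Str.len r) then acc + 1 else acc) 0
  let rowAdjust := rowAdjust * multiplier - rowAdjust
  let colAdjust : Int := (PySem.List.pyRange 0 col).foldl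
      (fun acc idx => if allDotsLoop space idx then acc + 1 else acc) 0
  let colAdjust := colAdjust * multiplier - colAdjust
  (row + rowAdjust, col + colAdjust)

def calculateDistanceBetweenGalaxies (g1 g2 : Int × Int) : Int :=
  |g1.1 - g2.1| + |g1.2 - g2.2|

def getDistanceBetweenAllGalaxies (galaxies : List (Int × Int)) : List Int :=
  (PySem.List.enumerate (PySem.List.slice galaxies none (some (-1)))).foldl
    (fun acc p =>
      (PySem.List.slice galaxies (some (p.1 + 1)) none).foldl
        (fun acc g2 => acc ++ [calculateDistanceBetweenGalaxies p.2 g2]) acc) []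

def part2 (input : List String) (multiplier : Int) : Int :=
  let galaxies := findGalaxies input
  let galaxies := galaxies.map (fun g => adjustCoordinateForExpandedSpace input g.1 g.2 multiplier)
  (getDistanceBetweenAllGalaxies galaxies).sum

-- ===== PORT B =====
def axisSum (xs : List Int) : Int :=
  ((PySem.List.enumerate xs).foldl
    (fun (s : Int × Int) p => (s.1 + p.1 * p.2 - s.2, s.2 + p.2)) (0, 0)).1

def part2_alt (input : List String) (multiplier : Int) : Int :=
  let width : Int := PySem.List.maxD (input.map (fun line => PySem.Str.len line)) (fun x => x) 0
  let cs := (PySem.List.pyRange 0 width).foldl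
    (fun (s : List Int × Int) c =>
      (s.1 ++ [(multiplier - 1) * s.2],
       if input.all (fun line => decide (c < PySem.Str.len line) &&
            (((PySem.Str.pyGet? line c).getD '.') == '.')) then s.2 + 1 else s.2))
    ([], 0)
  let colShift := cs.1
  let st := (PySem.List.enumerate input).foldl
    (fun (s : List Int × List Int × Int) rp =>
      let shift := (multiplier - 1) * s.2.2
      let inner := (PySem.List.enumerate rp.2.toList).foldl
        (fun (t : List Int × List Int) cp =>
          if cp.2 == '#'
          then (t.1 ++ [rp.1 + shift], t.2 ++ [cp.1 + PySem.List.pyGetD colShift cp.1 0])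
          else t) (s.1, s.2.1)
      (inner.1, inner.2, if rp.2.toList.all (fun ch => ch == '.') then s.2.2 + 1 else s.2.2))
    ([], [], 0)
  axisSum (PySem.List.sorted st.1 (fun x => x)) + axisSum (PySem.List.sorted st.2.1 (fun x => x))

-- ===== PRECONDITION & SPEC =====
-- RaiseCore holds exactly when Python A raises: its column scan, walking the lines in order at some
-- column idx needed by a galaxy, reads past the end of a line before meeting a non-'.' character.
def RaiseCore (input : List String) : Prop :=
  ∃ t ∈ input, ∃ j ∈ List.range t.toList.length, t.toList[j]? = some '#' ∧
    ∃ idx ∈ List.range j, ∃ i ∈ List.range input.length,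
      (input[i]?.getD "").toList.length ≤ idx ∧
      ∀ i' ∈ List.range i, idx < (input[i']?.getD "").toList.length ∧
        (input[i']?.getD "").toList[idx]? = some '.'
-- Pre_ excludes exactly the inputs on which Python A raises IndexError (see RaiseCore above).
def Pre_part2 (input : List String) (_multiplier : Int) : Prop := ¬ RaiseCore input
instance (input : List String) (multiplier : Int) : Decidable (Pre_part2 input multiplier) := by
  unfold Pre_part2 RaiseCore; infer_instance
def pvWitness_part2 : List String × Int := (["#.", ".#"], 2)

-- On grids where a galaxy's column scan walks past the end of a shorter all-dot prefix of lines,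
-- Python A raises IndexError while B (whose column test is guarded by the line length) returns the sum.
def Raises_part2 (input : List String) (_multiplier : Int) : Prop := RaiseCore input
instance (input : List String) (multiplier : Int) : Decidable (Raises_part2 input multiplier) := by
  unfold Raises_part2 RaiseCore; infer_instance
def pvRaiseWitness_part2 : List String × Int := (["..#", "."], 2)
def pvRaiseWitnessOut_part2 : Int := 0

def Spec_part2 (input : List String) (multiplier : Int) (out : Int) : Prop := out = part2_alt input multiplier
instance (input : List String) (multiplier : Int) (out : Int) : Decidable (Spec_part2 input multiplier out) := by unfold Spec_part2; infer_instance

-- ===== CLAIM (what is proved, stated in full; the proofs are below) =====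
def Claim_equal_part2 : Prop := ∀ (input : List String) (multiplier : Int), Dom_part2 input multiplier → Pre_part2 input multiplier → Spec_part2 input multiplier (part2 input multiplier)
def Claim_raises_part2 : Prop := (∀ (input : List String) (multiplier : Int), Dom_part2 input multiplier → Raises_part2 input multiplier → ¬ Pre_part2 input multiplier) ∧ (Dom_part2 (pvRaiseWitness_part2.1) (pvRaiseWitness_part2.2) ∧ Raises_part2 (pvRaiseWitness_part2.1) (pvRaiseWitness_part2.2) ∧ part2_alt (pvRaiseWitness_part2.1) (pvRaiseWitness_part2.2) = pvRaiseWitnessOut_part2)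

-- ===== LEMMAS AND PROOFS =====

-- ---- row/column predicates ----

theorem countgo_dot : ∀ (l : List Char) (acc : Nat),
    PySem.Chars.count.go ['.'] l.length l acc = acc + l.count '.' := by
  intro l
  induction l with
  | nil => intro acc; simp [PySem.Chars.count.go]
  | cons h t ih =>
      intro acc
      rw [List.length_cons, PySem.Chars.count.go]
      by_cases hh : h = '.'
      · subst hh; simp [List.isPrefixOf, ih]; omega
      · rw [if_neg (by simp [List.isPrefixOf]; exact fun h' => hh h'.symm)]
        rw [ih, List.count_cons_of_ne (by simpa [eq_comm] using hh)]

theorem count_dot (s : String) : PySem.Str.count s "." = s.toList.count '.' := by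
  rw [PySem.Str.count_eq, show (".".toList) = ['.'] from rfl, PySem.Chars.count]
  rw [if_neg (by simp), countgo_dot, Nat.zero_add]

def emptyRow (s : String) : Bool := s.toList.all (fun ch => ch == '.')

theorem rowPred_eq (s : String) :
    (((PySem.Str.count s "." : Int)) == PySem.Str.len s) = emptyRow s := by
  rw [count_dot, Bool.eq_iff_iff, PySem.Str.len_eq]
  simp only [beq_iff_eq, Nat.cast_inj, emptyRow, List.all_eq_true]
  rw [List.count_eq_length]
  simp [eq_comm]

theorem allDotsLoop_eq (space : List String) (idx : Int) :
    allDotsLoop space idx = space.all (fun r => ((PySem.Str.pyGet? r idx).getD '!') == '.') := by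
  induction space with
  | nil => rfl
  | cons r rest ih =>
      rw [allDotsLoop, List.all_cons, ih, Bool.eq_iff_iff]
      simp [beq_iff_eq]

-- ---- galaxy positions of one line / of the grid ----

def lineCols (cs : List Char) : List Int :=
  ((PySem.List.enumerate cs).filter (fun p => p.2 == '#')).map (fun p => p.1)

theorem innerFind_eq (rp : Int × String) (ret : List (Int × Int)) :
    (PySem.List.enumerate rp.2.toList).foldl (fun ret cp =>
        if cp.2 == '#' then ret ++ [(rp.1, cp.1)] else ret) ret
      = ret ++ (lineCols rp.2.toList).map (fun c => (rp.1, c)) := by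
  rw [PySem.List.foldl_append_if (p := fun (cp : Int × Char) => cp.2 == '#')
      (f := fun (cp : Int × Char) => (rp.1, cp.1))]
  simp [lineCols, Function.comp]

theorem findGalaxies_eq (input : List String) :
    findGalaxies input = (PySem.List.enumerate input).flatMap
      (fun rp => (lineCols rp.2.toList).map (fun c => (rp.1, c))) := by
  rw [findGalaxies,
    PySem.List.foldl_congr_mem _ _ (fun ret rp => ret ++ (lineCols rp.2.toList).map (fun c => (rp.1, c))) _
      (fun acc x _ => innerFind_eq x acc),
    PySem.List.foldl_append_eq_flatMap]
  simp

theorem mem_lineCols (cs : List Char) {c : Int} (h : c ∈ lineCols cs) :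
    ∃ k : Nat, c = (k : Int) ∧ ∃ hk : k < cs.length, cs[k] = '#' := by
  simp only [lineCols, List.mem_map, List.mem_filter] at h
  obtain ⟨p, ⟨hp, hhash⟩, hc⟩ := h
  rw [PySem.List.mem_enumerate_iff] at hp
  obtain ⟨k, hk, rfl⟩ := hp
  exact ⟨k, by simpa using hc.symm, hk, by simpa using hhash⟩

theorem adjust_eq (input : List String) (m r c : Int) (hr : 0 ≤ r) :
    adjustCoordinateForExpandedSpace input r c m =
      (r + (m - 1) * ((input.take r.toNat).countP emptyRow : Int),
       c + (m - 1) * (((PySem.List.pyRange 0 c).countP (fun idx => allDotsLoop input idx) : Int))) := by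
  rw [adjustCoordinateForExpandedSpace, PySem.List.slice_to _ hr]
  simp only [rowPred_eq]
  rw [PySem.List.foldl_if_add_one, PySem.List.foldl_if_add_one]
  rw [Prod.mk.injEq]
  constructor <;> ring

-- ---- the pairwise-distance list of A, structurally ----

def pairList : List (Int × Int) → List Int
  | [] => []
  | g :: t => t.map (fun h => calculateDistanceBetweenGalaxies g h) ++ pairList t

theorem flat_pairs : ∀ (suf pre : List (Int × Int)),
    (PySem.List.enumerate suf (pre.length : Int)).flatMap
      (fun p => ((pre ++ suf).drop (p.1.toNat + 1)).map
        (fun g2 => calculateDistanceBetweenGalaxies p.2 g2))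
    = pairList suf := by
  intro suf
  induction suf with
  | nil => intro pre; simp [pairList]
  | cons g t ih =>
      intro pre
      rw [PySem.List.enumerate_cons, List.flatMap_cons, pairList]
      have hsplit : pre ++ g :: t = (pre ++ [g]) ++ t := by simp
      have hdrop : (pre ++ g :: t).drop (((pre.length : Int)).toNat + 1) = t := by
        rw [hsplit, Int.toNat_natCast,
          show pre.length + 1 = (pre ++ [g]).length by simp, List.drop_left]
      rw [hdrop]
      rw [hsplit]
      rw [show ((pre.length : Int) + 1) = (((pre ++ [g]).length : Nat) : Int) by simp]
      rw [ih (pre ++ [g])]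

theorem flat_pairs_dropLast (gs : List (Int × Int)) :
    (PySem.List.enumerate gs.dropLast).flatMap
      (fun p => (gs.drop (p.1.toNat + 1)).map
        (fun g2 => calculateDistanceBetweenGalaxies p.2 g2))
    = (PySem.List.enumerate gs).flatMap
      (fun p => (gs.drop (p.1.toNat + 1)).map
        (fun g2 => calculateDistanceBetweenGalaxies p.2 g2)) := by
  rcases eq_or_ne gs [] with rfl | h
  · rfl
  · have hlen : gs.dropLast.length = gs.length - 1 := List.length_dropLast
    have hpos : 0 < gs.length := List.length_pos_iff.mpr h
    have henum : PySem.List.enumerate gs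
        = PySem.List.enumerate gs.dropLast ++ [((gs.dropLast.length : Int), gs.getLast h)] := by
      conv_lhs => rw [← List.dropLast_concat_getLast h]
      rw [PySem.List.enumerate_append, PySem.List.enumerate_cons, PySem.List.enumerate_nil]
      norm_num
    rw [henum, List.flatMap_append]
    simp
    omega

theorem getDist_eq (gs : List (Int × Int)) :
    getDistanceBetweenAllGalaxies gs = pairList gs := by
  rw [getDistanceBetweenAllGalaxies, PySem.List.slice_to_neg_one]
  rw [PySem.List.foldl_congr_mem _ _
      (fun acc p => acc ++ (gs.drop (p.1.toNat + 1)).map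
        (fun g2 => calculateDistanceBetweenGalaxies p.2 g2)) _ ?hcg]
  case hcg =>
    intro acc p hp
    rw [PySem.List.foldl_append_singleton_eq_map]
    rw [PySem.List.mem_enumerate_iff] at hp
    obtain ⟨k, hk, rfl⟩ := hp
    rw [PySem.List.slice_from gs (by omega : (0:Int) ≤ 0 + (k : Int) + 1)]
    norm_num
  rw [PySem.List.foldl_append_eq_flatMap, List.nil_append, flat_pairs_dropLast]
  have := flat_pairs gs []
  simpa using this

-- ---- per-axis pair sums ----

def pairAbs : List Int → Int
  | [] => 0
  | x :: t => (t.map (fun y => |x - y|)).sum + pairAbs t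

theorem pairList_sum_split (gs : List (Int × Int)) :
    (pairList gs).sum = pairAbs (gs.map Prod.fst) + pairAbs (gs.map Prod.snd) := by
  induction gs with
  | nil => rfl
  | cons g t ih =>
      rw [pairList, List.sum_append, ih, List.map_cons, List.map_cons, pairAbs, pairAbs]
      simp only [calculateDistanceBetweenGalaxies]
      rw [PySem.List.sum_map_add_int t (fun h => |g.1 - h.1|) (fun h => |g.2 - h.2|)]
      rw [List.map_map, List.map_map]
      simp only [Function.comp_def]
      ring

theorem pairAbs_perm {l l' : List Int} (h : l.Perm l') : pairAbs l = pairAbs l' := by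
  induction h with
  | nil => rfl
  | cons x h ih => rw [pairAbs, pairAbs, ih, (h.map (fun y => |x - y|)).sum_eq]
  | swap x y l =>
      rw [pairAbs, pairAbs, pairAbs, pairAbs, List.map_cons, List.map_cons, List.sum_cons,
        List.sum_cons, abs_sub_comm y x]
      ring
  | trans _ _ ih1 ih2 => rw [ih1, ih2]

theorem pairAbs_append_singleton (xs : List Int) (x : Int) :
    pairAbs (xs ++ [x]) = pairAbs xs + (xs.map (fun y => |y - x|)).sum := by
  induction xs with
  | nil => simp [pairAbs]
  | cons a t ih =>
      rw [List.cons_append, pairAbs, pairAbs, ih, List.map_append, List.sum_append,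
        List.map_cons, List.sum_cons]
      simp [abs_sub_comm a x]
      ring

theorem sum_map_sub_int (l : List Int) (x : Int) :
    (l.map (fun y => x - y)).sum = l.length * x - l.sum := by
  induction l with
  | nil => simp
  | cons a t ih => simp [ih]; ring

theorem axisFold_snd : ∀ (xs : List Int) (s t p : Int),
    ((PySem.List.enumerate xs s).foldl
      (fun (st : Int × Int) q => (st.1 + q.1 * q.2 - st.2, st.2 + q.2)) (t, p)).2
    = p + xs.sum := by
  intro xs
  induction xs with
  | nil => intro s t p; simp [PySem.List.enumerate_nil]
  | cons a l ih =>
      intro s t p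
      rw [PySem.List.enumerate_cons, List.foldl_cons, ih]
      simp [List.sum_cons]
      ring

theorem axisSum_append (xs : List Int) (x : Int) :
    axisSum (xs ++ [x]) = axisSum xs + xs.length * x - xs.sum := by
  rw [axisSum, axisSum, PySem.List.enumerate_append, List.foldl_append]
  simp only [PySem.List.enumerate_cons, PySem.List.enumerate_nil, List.foldl_cons,
    List.foldl_nil]
  rw [show (List.foldl (fun (s : Int × Int) p => (s.1 + p.1 * p.2 - s.2, s.2 + p.2)) (0, 0)
      (PySem.List.enumerate xs)).2 = 0 + xs.sum from axisFold_snd xs 0 0 0]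
  ring

theorem axisSum_eq_pairAbs : ∀ (xs : List Int), xs.Pairwise (· ≤ ·) → axisSum xs = pairAbs xs := by
  intro xs
  induction xs using List.reverseRecOn with
  | nil => intro _; rfl
  | append_singleton xs x ih =>
      intro h
      obtain ⟨h1, -, h3⟩ := List.pairwise_append.mp h
      rw [axisSum_append, pairAbs_append_singleton, ih h1]
      have hle : ∀ y ∈ xs, y ≤ x := fun y hy => h3 y hy x (by simp)
      have hmap : xs.map (fun y => |y - x|) = xs.map (fun y => x - y) :=
        List.map_congr_left (fun y hy => by
          rw [abs_sub_comm]; exact abs_of_nonneg (by have := hle y hy; omega))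
      rw [hmap, sum_map_sub_int]
      ring

-- ---- characterizations of B's folds ----

theorem colshift_fold (P : Int → Bool) (m : Int) : ∀ (n : Nat),
    (PySem.List.pyRange 0 (n : Int)).foldl
      (fun (s : List Int × Int) c => (s.1 ++ [(m - 1) * s.2], if P c then s.2 + 1 else s.2))
      ([], 0)
    = ((PySem.List.pyRange 0 (n : Int)).map
        (fun c => (m - 1) * (((PySem.List.pyRange 0 c).countP P : Nat) : Int)),
       (((PySem.List.pyRange 0 (n : Int)).countP P : Nat) : Int)) := by
  intro n
  induction n with
  | zero => simp [PySem.List.pyRange_one_eq_nil (le_refl (0 : Int))]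
  | succ n ih =>
      rw [show ((n + 1 : Nat) : Int) = (n : Int) + 1 by push_cast; ring,
        PySem.List.pyRange_one_succ_right (by positivity), List.foldl_append, ih]
      simp only [List.foldl_cons, List.foldl_nil, List.map_append, List.map_cons, List.map_nil,
        List.countP_append]
      rw [Prod.mk.injEq]
      constructor
      · rfl
      · simp only [List.countP_cons, List.countP_nil]
        split_ifs <;> simp

theorem innerB_aux (f g : Int × Char → Int) :
    ∀ (l : List (Int × Char)) (a b : List Int),
    l.foldl (fun (t : List Int × List Int) cp =>
        if cp.2 == '#' then (t.1 ++ [f cp], t.2 ++ [g cp]) else t) (a, b)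
    = (a ++ (l.filter (fun p => p.2 == '#')).map f,
       b ++ (l.filter (fun p => p.2 == '#')).map g) := by
  intro l
  induction l with
  | nil => intro a b; simp
  | cons p t ih =>
      intro a b
      rw [List.foldl_cons]
      by_cases hp : (p.2 == '#') = true
      · rw [if_pos hp]
        refine (ih _ _).trans ?_
        rw [List.filter_cons_of_pos (l := t) hp]
        simp
      · rw [if_neg hp]
        refine (ih _ _).trans ?_
        rw [List.filter_cons_of_neg (l := t) (by simpa using hp)]

theorem mainB_fold (m : Int) (colShift : List Int) (X : List String) :
    ∀ (suf pre : List String) (rows cols : List Int), X = pre ++ suf →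
    (PySem.List.enumerate suf (pre.length : Int)).foldl
      (fun (s : List Int × List Int × Int) rp =>
        let shift := (m - 1) * s.2.2
        let inner := (PySem.List.enumerate rp.2.toList).foldl
          (fun (t : List Int × List Int) cp =>
            if cp.2 == '#'
            then (t.1 ++ [rp.1 + shift], t.2 ++ [cp.1 + PySem.List.pyGetD colShift cp.1 0])
            else t) (s.1, s.2.1)
        (inner.1, inner.2, if rp.2.toList.all (fun ch => ch == '.') then s.2.2 + 1 else s.2.2))
      (rows, cols, ((pre.countP emptyRow : Nat) : Int))
    = (rows ++ (PySem.List.enumerate suf (pre.length : Int)).flatMap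
          (fun rp => (lineCols rp.2.toList).map
            (fun _ => rp.1 + (m - 1) * (((X.take rp.1.toNat).countP emptyRow : Nat) : Int))),
       cols ++ (PySem.List.enumerate suf (pre.length : Int)).flatMap
          (fun rp => (lineCols rp.2.toList).map
            (fun c => c + PySem.List.pyGetD colShift c 0)),
       ((X.countP emptyRow : Nat) : Int)) := by
  intro suf
  induction suf with
  | nil =>
      intro pre rows cols hX
      simp [PySem.List.enumerate_nil, hX]
  | cons line t ih =>
      intro pre rows cols hX
      have htake : X.take ((pre.length : Int)).toNat = pre := by
        rw [hX, Int.toNat_natCast, List.take_left]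
      have hXsplit : X = (pre ++ [line]) ++ t := by rw [hX]; simp
      rw [PySem.List.enumerate_cons, List.foldl_cons, List.flatMap_cons, List.flatMap_cons]
      simp only []
      rw [innerB_aux]
      have hstart : (pre.length : Int) + 1 = (((pre ++ [line]).length : Nat) : Int) := by simp
      have hcount : (if line.toList.all (fun ch => ch == '.') = true
            then ((pre.countP emptyRow : Nat) : Int) + 1
            else ((pre.countP emptyRow : Nat) : Int))
          = (((pre ++ [line]).countP emptyRow : Nat) : Int) := by
        rw [List.countP_append]
        simp only [List.countP_cons, List.countP_nil, emptyRow]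
        split_ifs with hp
        · simp
        · simp
      rw [hstart, hcount, ih (pre ++ [line]) _ _ hXsplit, htake]
      simp [lineCols, List.map_map, Function.comp_def, List.append_assoc]

theorem flatMap_congr_mem {a b : Type} {l : List a} {f g : a → List b}
    (h : ∀ x ∈ l, f x = g x) : l.flatMap f = l.flatMap g := by
  induction l with
  | nil => rfl
  | cons x t ih =>
      rw [List.flatMap_cons, List.flatMap_cons, h x (by simp),
        ih (fun y hy => h y (List.mem_cons_of_mem x hy))]

theorem width_spec (input : List String) :
    0 ≤ PySem.List.maxD (input.map (fun line => PySem.Str.len line)) (fun x => x) 0 ∧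
    ∀ line ∈ input, PySem.Str.len line ≤
      PySem.List.maxD (input.map (fun line => PySem.Str.len line)) (fun x => x) 0 := by
  rcases h : PySem.List.max? (input.map (fun line => PySem.Str.len line)) (fun x => x)
    with _ | m'
  · rw [PySem.List.max?_eq_none_iff, List.map_eq_nil_iff] at h
    subst h
    simp [PySem.List.maxD, PySem.List.max?]
  · have hmem := PySem.List.max?_mem h
    have hmax := PySem.List.max?_isMax h
    constructor
    · obtain ⟨l, hl, rfl⟩ := List.mem_map.mp hmem
      rw [PySem.List.maxD, h, Option.getD_some, PySem.Str.len_eq]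
      positivity
    · intro line hline
      rw [PySem.List.maxD, h, Option.getD_some]
      exact hmax _ (List.mem_map_of_mem hline)

theorem colPred_line (line : String) (idx : Int) (h0 : 0 ≤ idx) :
    (((PySem.Str.pyGet? line idx).getD '!') == '.')
      = (decide (idx < PySem.Str.len line) &&
          (((PySem.Str.pyGet? line idx).getD '.') == '.')) := by
  rw [PySem.Str.pyGet?_eq, PySem.Chars.pyGet?_eq_listPyGet?, PySem.Str.len_eq]
  rcases h : PySem.List.pyGet? line.toList idx with _ | ch
  · have hnin := (PySem.List.pyGet?_eq_none_iff _ _).mp h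
    have hlen : ¬ (idx < (line.toList.length : Int)) := by
      intro hc
      exact hnin ⟨by omega, hc⟩
    have hL : line.length = line.toList.length := by simp
    simp
    omega
  · have hin : idx < (line.toList.length : Int) := by
      by_contra hc
      rw [(PySem.List.pyGet?_eq_none_iff _ _).mpr (fun hr => hc hr.2)] at h
      simp at h
    have hL : line.length = line.toList.length := by simp
    simp
    intro
    omega

theorem colPred_agree (input : List String) (idx : Int) (h0 : 0 ≤ idx) :
    allDotsLoop input idx
      = input.all (fun line => decide (idx < PySem.Str.len line) &&
          (((PySem.Str.pyGet? line idx).getD '.') == '.')) := by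
  rw [allDotsLoop_eq, Bool.eq_iff_iff]
  simp only [List.all_eq_true]
  exact ⟨fun h line hl => by rw [← colPred_line line idx h0]; exact h line hl,
         fun h line hl => by rw [colPred_line line idx h0]; exact h line hl⟩

theorem axisSum_sorted_eq_pairAbs (xs : List Int) :
    axisSum (PySem.List.sorted xs (fun x => x)) = pairAbs xs := by
  rw [axisSum_eq_pairAbs _ (PySem.List.sorted_pairwise xs (fun x => x))]
  exact pairAbs_perm (PySem.List.sorted_perm xs (fun x => x) false)

-- ===== VERDICT (by name: the statement is the Claim_ definition above) =====
theorem part2_spec : Claim_equal_part2 := by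
  intro input m hdom hpre
  unfold Spec_part2
  -- A's value as a pair of per-axis pair-sums
  have hA : part2 input m = (getDistanceBetweenAllGalaxies ((findGalaxies input).map
      (fun g => adjustCoordinateForExpandedSpace input g.1 g.2 m))).sum := rfl
  rw [hA, getDist_eq, pairList_sum_split]
  -- B's folds, characterized
  obtain ⟨hw0, hwge⟩ := width_spec input
  have hw : PySem.List.maxD (input.map (fun line => PySem.Str.len line)) (fun x => x) 0
      = (((PySem.List.maxD (input.map (fun line => PySem.Str.len line)) (fun x => x) 0).toNat : Nat) : Int) :=
    (Int.toNat_of_nonneg hw0).symm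
  have hcs := colshift_fold
    (fun c => input.all (fun line => decide (c < PySem.Str.len line) &&
      (((PySem.Str.pyGet? line c).getD '.') == '.'))) m
    (PySem.List.maxD (input.map (fun line => PySem.Str.len line)) (fun x => x) 0).toNat
  rw [part2_alt]
  simp only []
  rw [hw, hcs]
  simp only []
  have hmain := mainB_fold m
    ((PySem.List.pyRange 0 (((PySem.List.maxD (input.map (fun line => PySem.Str.len line)) (fun x => x) 0).toNat : Nat) : Int)).map
      (fun c => (m - 1) * (((PySem.List.pyRange 0 c).countP
        (fun c => input.all (fun line => decide (c < PySem.Str.len line) &&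
          (((PySem.Str.pyGet? line c).getD '.') == '.'))) : Nat) : Int)))
    input input [] [] [] rfl
  simp only [List.countP_nil, Nat.cast_zero, List.length_nil, List.nil_append] at hmain
  rw [hmain]
  simp only []
  rw [axisSum_sorted_eq_pairAbs, axisSum_sorted_eq_pairAbs]
  -- the adjusted galaxy list, in closed form
  have hgal : (findGalaxies input).map (fun g => adjustCoordinateForExpandedSpace input g.1 g.2 m)
      = (PySem.List.enumerate input).flatMap
        (fun rp => (lineCols rp.2.toList).map (fun c =>
          (rp.1 + (m - 1) * (((input.take rp.1.toNat).countP emptyRow : Nat) : Int),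
           c + (m - 1) * (((PySem.List.pyRange 0 c).countP
             (fun idx => allDotsLoop input idx) : Nat) : Int)))) := by
    rw [findGalaxies_eq, List.map_flatMap]
    apply flatMap_congr_mem
    intro rp hrp
    rw [List.map_map]
    apply List.map_congr_left
    intro c hc
    have h0 : 0 ≤ rp.1 := by
      rw [PySem.List.mem_enumerate_iff] at hrp
      obtain ⟨k, hk, rfl⟩ := hrp
      simp
    exact adjust_eq input m rp.1 c h0
  rw [hgal, List.map_flatMap, List.map_flatMap]
  congr 1
  · apply congrArg pairAbs
    apply flatMap_congr_mem
    intro rp hrp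
    rw [List.map_map]
    rfl
  · apply congrArg pairAbs
    apply flatMap_congr_mem
    intro rp hrp
    rw [List.map_map]
    apply List.map_congr_left
    intro c hc
    rw [PySem.List.mem_enumerate_iff] at hrp
    obtain ⟨k, hk, rfl⟩ := hrp
    obtain ⟨j, rfl, hj, hhash⟩ := mem_lineCols _ hc
    simp only [Function.comp_def]
    have hjw : (j : Int) < (((PySem.List.maxD (input.map (fun line => PySem.Str.len line)) (fun x => x) 0).toNat : Nat) : Int) := by
      have h1 : PySem.Str.len (input[k]) ≤ _ := hwge _ (List.getElem_mem hk)
      rw [← hw]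
      calc (j : Int) < ((input[k]).toList.length : Nat) := by exact_mod_cast hj
        _ = PySem.Str.len (input[k]) := by rw [PySem.Str.len_eq]
        _ ≤ _ := h1
    rw [PySem.List.pyGetD_map_pyRange_of_nonneg _ _ _ _ (by positivity) hjw]
    have hcnt : (PySem.List.pyRange 0 (j : Int)).countP (fun idx => allDotsLoop input idx)
        = (PySem.List.pyRange 0 (j : Int)).countP
          (fun c => input.all (fun line => decide (c < PySem.Str.len line) &&
            (((PySem.Str.pyGet? line c).getD '.') == '.'))) := by
      apply List.countP_congr
      intro idx hidx
      rw [PySem.List.mem_pyRange_one] at hidx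
      rw [colPred_agree input idx hidx.1]
    rw [hcnt]

theorem part2_raises : Claim_raises_part2 := by
  unfold Claim_raises_part2
  exact ⟨fun _ _ _ h hp => hp h, by decide⟩

-- self-check: the stated witness really lies inside Raises_part2 (read off part2_raises)
theorem pvRaiseWitness_part2_ok :
    Raises_part2 (pvRaiseWitness_part2.1) (pvRaiseWitness_part2.2) :=
  part2_raises.2.2.1
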